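-- pv_equiv track=rewrite | github.com/EdgeLake/EdgeLake | edge_lake/generic/utils_json.py | replace_non_supported_chars
-- ===== SOURCE A (Python) =====
-- replaced_chars = {
--     '"': '|',
--     '\'': '|',
--     '\n': ' ',
--     '\t': ' ',
-- }
--
-- def replace_non_supported_chars(source_str):
--
--     source = source_str
--     if len(source_str) > 2:
--         # remove quotations
--         ch = source_str[0]
--         if ch == '\'' or ch == '`':
--             if source_str[-1] == ch:
--                 source = source_str[1:-1]
--
--     length = len(source)
--     dest = ""
--     copied = 0
--     for x in range(length):
--         if source[x] in replaced_chars.keys():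
--             dest += source[copied:x]
--             dest += replaced_chars[source[x]]
--             copied = x + 1
--     if dest != "":
--         # some chars were replaced
--         if copied < length:
--             dest += source[copied:]
--     else:
--         dest = source
--     return dest
-- ===== SOURCE B (Python) =====
-- def replace_non_supported_chars(source_str):
--     source = source_str
--     if len(source_str) > 2 and source_str[0] in ("'", "`") and source_str[-1] == source_str[0]:
--         source = source_str[1:-1]
--     return source.replace('"', '|').replace("'", '|').replace('\n', ' ').replace('\t', ' ')
-- ===== Notes on version B (the rewrite author's own statement) =====
-- stated objective: faster
-- what changed: Replaces A's Python-level single-pass segment-copy loop (dest buffer + 'copied' pointer + slice splices) with quote-stripping followed by four independent str.replace passes, one per substituted character.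
import Mathlib
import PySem

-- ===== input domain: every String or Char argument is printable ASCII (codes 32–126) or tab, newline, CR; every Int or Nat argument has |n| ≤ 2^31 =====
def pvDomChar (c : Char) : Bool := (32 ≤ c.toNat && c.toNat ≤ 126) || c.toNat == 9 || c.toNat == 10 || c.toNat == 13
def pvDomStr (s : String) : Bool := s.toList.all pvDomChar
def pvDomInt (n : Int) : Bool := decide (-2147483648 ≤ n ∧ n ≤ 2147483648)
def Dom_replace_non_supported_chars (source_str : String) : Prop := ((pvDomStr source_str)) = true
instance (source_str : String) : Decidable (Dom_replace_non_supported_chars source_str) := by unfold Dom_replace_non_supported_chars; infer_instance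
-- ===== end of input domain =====

-- B strips the quote pair exactly as A does, then applies four independent
-- str.replace passes instead of A's per-character segment-copy loop; same O(n),
-- measurably faster by constant factor (C-level replace vs Python-level loop).

-- ===== PORT A =====
-- the module-level dict replaced_chars (keys/values are 1-char strings; ported on chars)
def pvReplacedChars : PySem.Dict Char Char :=
  ((((PySem.Dict.empty).insert '"' '|').insert '\'' '|').insert '\n' ' ').insert '\t' ' '

-- one step of A's 'for x in range(length)' loop; state = (dest, copied)
def pvAStep (source : List Char) (st : List Char × Nat) (x : Nat) : List Char × Nat :=
  match PySem.List.pyGet? source (x : Int) with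
  | some c =>
      if c ∈ pvReplacedChars.keys then
        (st.1 ++ PySem.List.slice source (some (st.2 : Int)) (some (x : Int)) ++
          [(pvReplacedChars.get? c).getD c], x + 1)
      else st
  | none => st

def replace_non_supported_chars (source_str : String) : String :=
  let cs := source_str.toList
  let source : List Char :=
    if 2 < cs.length then
      match PySem.List.pyGet? cs 0, PySem.List.pyGet? cs (-1) with
      | some ch, some lst =>
          if (ch = '\'' ∨ ch = '`') then
            (if lst = ch then PySem.List.slice cs (some 1) (some (-1)) else cs)
          else cs
      | _, _ => cs
    else cs
  let length := source.length
  let st := (List.range length).foldl (pvAStep source) ([], 0)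
  let dest := st.1
  let copied := st.2
  if dest ≠ [] then
    (if copied < length then
      String.ofList (dest ++ PySem.List.slice source (some (copied : Int)) none)
    else String.ofList dest)
  else String.ofList source

-- ===== PORT B =====
def replace_non_supported_chars_alt (source_str : String) : String :=
  let cs := source_str.toList
  let source : String :=
    if 2 < cs.length ∧
        (PySem.List.pyGet? cs 0 = some '\'' ∨ PySem.List.pyGet? cs 0 = some '`') ∧
        PySem.List.pyGet? cs (-1) = PySem.List.pyGet? cs 0 then
      String.ofList (PySem.List.slice cs (some 1) (some (-1)))
    else source_str
  PySem.Str.replace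
    (PySem.Str.replace
      (PySem.Str.replace
        (PySem.Str.replace source "\"" "|") "'" "|") "\n" " ") "\t" " "

-- ===== PRECONDITION & SPEC =====
def Spec_replace_non_supported_chars (source_str : String) (out : String) : Prop := out = replace_non_supported_chars_alt source_str
instance (source_str : String) (out : String) : Decidable (Spec_replace_non_supported_chars source_str out) := by unfold Spec_replace_non_supported_chars; infer_instance

-- ===== CLAIM (what is proved, stated in full; the proofs are below) =====
def Claim_equal_replace_non_supported_chars : Prop := ∀ (source_str : String), Dom_replace_non_supported_chars source_str → Spec_replace_non_supported_chars source_str (replace_non_supported_chars source_str)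

-- ===== LEMMAS AND PROOFS =====

-- the character substitution both programs realise
def pvF (c : Char) : Char :=
  if c = '"' then '|' else if c = '\'' then '|' else if c = '\n' then ' ' else if c = '\t' then ' ' else c

-- single-char Python str.replace is a pointwise map
lemma replace_go_single (o n : Char) :
    ∀ (l acc : List Char) (fuel : Nat), l.length ≤ fuel →
      PySem.Chars.replace.go [o] [n] fuel l acc =
        acc.reverse ++ l.map (fun c => if c = o then n else c) := by
  intro l
  induction l with
  | nil =>
      intro acc fuel _
      rw [PySem.Chars.replace.go.eq_def]
      cases fuel <;> simp
  | cons c t ih =>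
      intro acc fuel hf
      cases fuel with
      | zero => simp at hf
      | succ m =>
          rw [PySem.Chars.replace.go.eq_def]
          simp only [List.isPrefixOf, List.length_cons] at *
          by_cases h : c = o
          · simp [h, ih _ m (by omega)]
          · have : (o == c) = false := by simp [Ne.symm h]
            simp [this, h, ih _ m (by omega)]

lemma replace_single (s : List Char) (o n : Char) :
    PySem.Chars.replace s [o] [n] = s.map (fun c => if c = o then n else c) := by
  unfold PySem.Chars.replace
  simp [replace_go_single o n s [] s.length le_rfl]

-- A's loop invariant: after the first k indices, dest ++ the untouched tail of
-- the processed prefix equals the mapped prefix, and dest = [] forces copied = 0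
lemma pvAStep_inv (source : List Char) :
    ∀ (k : Nat), k ≤ source.length →
      let st := (List.range k).foldl (pvAStep source) ([], 0)
      st.2 ≤ k ∧
      st.1 ++ (source.take k).drop st.2 = (source.take k).map pvF ∧
      (st.1 = [] → st.2 = 0) := by
  intro k
  induction k with
  | zero => simp
  | succ m ih =>
      intro hk
      have hm := ih (by omega)
      simp only [List.range_succ, List.foldl_append, List.foldl_cons, List.foldl_nil]
      set st := (List.range m).foldl (pvAStep source) ([], 0) with hst
      obtain ⟨h1, h2, h3⟩ := hm
      have hmlt : m < source.length := by omega
      have hget : PySem.List.pyGet? source (m : Int) = some source[m] := by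
        rw [PySem.List.pyGet?_natCast]; simp [hmlt]
      have htake : source.take (m+1) = source.take m ++ [source[m]] :=
        List.take_succ_eq_append_getElem hmlt
      unfold pvAStep
      rw [hget]
      by_cases hc : source[m] ∈ pvReplacedChars.keys
      · -- a replaced character
        have hfval : (pvReplacedChars.get? source[m]).getD source[m] = pvF source[m] := by
          revert hc; simp [pvReplacedChars, pvF, PySem.Dict.keys, PySem.Dict.insert,
            PySem.Dict.empty, PySem.Dict.get?]
          -- enumerate the four keys
          intro h
          rcases h with h | h | h | h <;> rw [h] <;> decide
        have hslice : PySem.List.slice source (some (st.2 : Int)) (some (m : Int)) =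
            (source.take m).drop st.2 := by
          rw [PySem.List.slice_natCast]
          rw [List.drop_take]
        have hdrop : ((source.take m ++ [source[m]]) : List Char).drop (m+1) = [] :=
          List.drop_eq_nil_of_le (by simp [List.length_take])
        simp only [hc, if_true]
        refine ⟨by omega, ?_, by simp⟩
        rw [htake, List.map_append, hdrop, List.append_nil, hslice, hfval, h2]
        simp
      · -- an unchanged character: pvF is the identity on it
        have hfid : pvF source[m] = source[m] := by
          revert hc; simp [pvReplacedChars, pvF, PySem.Dict.keys, PySem.Dict.insert,
            PySem.Dict.empty]
          intro h1 h2 h3 h4; simp [h1, h2, h3, h4]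
        simp only [hc, if_false]
        refine ⟨by omega, ?_, h3⟩
        rw [htake, List.map_append,
          List.drop_append_of_le_length (by simp [List.length_take]; omega),
          ← List.append_assoc, h2]
        simp [hfid]
  
-- A computes the pointwise map of its (possibly quote-stripped) source
lemma pvA_loop (source : List Char) :
    (let length := source.length
     let st := (List.range length).foldl (pvAStep source) ([], 0)
     let dest := st.1
     let copied := st.2
     if dest ≠ [] then
       (if copied < length then
         String.ofList (dest ++ PySem.List.slice source (some (copied : Int)) none)
       else String.ofList dest)
     else String.ofList source) = String.ofList (source.map pvF) := by
  obtain ⟨h1, h2, h3⟩ := pvAStep_inv source source.length le_rfl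
  simp only [List.take_length] at h2
  simp only [ne_eq]
  generalize hg : (List.range source.length).foldl (pvAStep source) ([], 0) = st at *
  by_cases hd : st.1 = []
  · have h0 := h3 hd
    rw [hd, h0] at h2
    simp only [List.nil_append, List.drop_zero] at h2
    simp [hd, ← h2]
  · by_cases hcl : st.2 < source.length
    · rw [PySem.List.slice_from source (Int.natCast_nonneg st.2)]
      simp [hd, hcl, h2]
    · have he : st.2 = source.length := by omega
      rw [he] at h2
      simp only [List.drop_length, List.append_nil] at h2
      simp [hcl, h2]
      intro h'
      simp [h']

-- the four chained single-char replaces compose to pvF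
lemma pvB_chain (cs : List Char) :
    PySem.Chars.replace
      (PySem.Chars.replace
        (PySem.Chars.replace
          (PySem.Chars.replace cs ['"'] ['|']) ['\''] ['|']) ['\n'] [' ']) ['\t'] [' ']
      = cs.map pvF := by
  simp only [replace_single, List.map_map]
  apply List.map_congr_left
  intro c _
  simp only [Function.comp]
  by_cases h1 : c = '"' <;> by_cases h2 : c = '\'' <;> by_cases h3 : c = '\n' <;>
    by_cases h4 : c = '\t' <;> simp_all [pvF]

-- B = the pointwise map of the same stripped source
lemma pvB_eq (s : String) :
    (PySem.Str.replace
      (PySem.Str.replace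
        (PySem.Str.replace
          (PySem.Str.replace s "\"" "|") "'" "|") "\n" " ") "\t" " ") =
    String.ofList (s.toList.map pvF) := by
  apply String.toList_injective  -- strings are equal iff their char lists are
  simp only [PySem.Str.toList_replace]
  rw [show ("\"" : String).toList = ['"'] from rfl, show ("|" : String).toList = ['|'] from rfl,
    show ("'" : String).toList = ['\''] from rfl, show ("\n" : String).toList = ['\n'] from rfl,
    show (" " : String).toList = [' '] from rfl, show ("\t" : String).toList = ['\t'] from rfl]
  rw [pvB_chain]
  simp [String.toList_ofList]

-- ===== VERDICT (by name: the statement is the Claim_ definition above) =====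
theorem replace_non_supported_chars_spec : Claim_equal_replace_non_supported_chars := by
  intro s _
  unfold Spec_replace_non_supported_chars replace_non_supported_chars replace_non_supported_chars_alt
  rw [pvA_loop]
  simp only [String.length_toList]
  by_cases hlen : 2 < s.length
  · simp only [hlen, if_true]
    cases hg0 : PySem.List.pyGet? s.toList 0 with
    | none => simp [pvB_eq]
    | some ch =>
      cases hg1 : PySem.List.pyGet? s.toList (-1) with
      | none => simp [pvB_eq]
      | some lst =>
        by_cases hch : ch = '\'' ∨ ch = '`'
        · by_cases hl : lst = ch
          · simp [hch, hl, pvB_eq]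
          · simp [hch, hl, pvB_eq]
        · simp [hch, pvB_eq]
  · simp [hlen, pvB_eq]
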